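-- pv_equiv track=rewrite | github.com/EnglaCM/ence7599 | KandDV1 PoD/Assignment1Algebra1.py | santDisVL
-- ===== SOURCE A (Python) =====
-- def santDisVL(a,b,c):
--     """
--     tar kombinationer från p1-6 i tvåpar och ser om någon av paren är ss (att båda p är sanna och därmed även disjunktionen i VL),
--     i sådana fall räknas dessa
--     """
--     kombinations = []
--     res = 0
--     for s in a:
--         for f in b:
--             for p in c:
--                 kombinations.append((s,f,p))
--     for k in kombinations:
--         if "ss" in k:
--             res += 1
--     return res
-- ===== SOURCE B (Python) =====
-- def santDisVL(a, b, c):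
--     na = sum(1 for x in a if x != "ss")
--     nb = sum(1 for x in b if x != "ss")
--     nc = sum(1 for x in c if x != "ss")
--     return len(a) * len(b) * len(c) - na * nb * nc
-- ===== Notes on version B (the rewrite author's own statement) =====
-- stated objective: faster
-- what changed: Replaced materialising the full Cartesian product a×b×c and scanning it for tuples containing "ss" with a complement count: total triples minus the product of per-list counts of elements != "ss".
import Mathlib
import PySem

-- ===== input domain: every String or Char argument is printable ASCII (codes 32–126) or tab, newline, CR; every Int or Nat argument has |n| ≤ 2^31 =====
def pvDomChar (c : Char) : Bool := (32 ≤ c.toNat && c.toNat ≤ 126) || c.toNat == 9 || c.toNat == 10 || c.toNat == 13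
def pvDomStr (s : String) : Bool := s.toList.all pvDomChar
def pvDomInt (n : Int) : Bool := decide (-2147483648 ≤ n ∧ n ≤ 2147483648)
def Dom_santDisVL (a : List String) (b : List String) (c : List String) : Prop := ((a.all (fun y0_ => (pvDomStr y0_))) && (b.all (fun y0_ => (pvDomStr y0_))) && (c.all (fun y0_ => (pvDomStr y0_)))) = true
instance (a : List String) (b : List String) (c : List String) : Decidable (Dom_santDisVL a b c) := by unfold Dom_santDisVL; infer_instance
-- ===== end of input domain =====

-- B replaces materialising the full Cartesian product a×b×c and scanning it with a
-- complement count (total triples minus product of per-list counts of elements ≠ "ss").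

-- ===== PORT A =====
def santDisVL (a : List String) (b : List String) (c : List String) : Int :=
  let kombinations : List (String × String × String) :=
    a.foldl (fun acc s =>
      b.foldl (fun acc2 f =>
        c.foldl (fun acc3 p => acc3 ++ [(s, f, p)]) acc2) acc) []
  kombinations.foldl (fun res k =>
    if k.1 == "ss" || k.2.1 == "ss" || k.2.2 == "ss" then res + 1 else res) 0

-- ===== PORT B =====
def santDisVL_alt (a : List String) (b : List String) (c : List String) : Int :=
  let na : Int := a.countP (fun x => x != "ss")
  let nb : Int := b.countP (fun x => x != "ss")
  let nc : Int := c.countP (fun x => x != "ss")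
  (a.length : Int) * (b.length : Int) * (c.length : Int) - na * nb * nc

-- ===== PRECONDITION & SPEC =====
def Spec_santDisVL (a : List String) (b : List String) (c : List String) (out : Int) : Prop := out = santDisVL_alt a b c
instance (a : List String) (b : List String) (c : List String) (out : Int) : Decidable (Spec_santDisVL a b c out) := by unfold Spec_santDisVL; infer_instance

-- ===== CLAIM (what is proved, stated in full; the proofs are below) =====
def Claim_equal_santDisVL : Prop := ∀ (a : List String) (b : List String) (c : List String), Dom_santDisVL a b c → Spec_santDisVL a b c (santDisVL a b c)

-- ===== LEMMAS AND PROOFS =====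

-- the predicate A tests on each triple
def pvQ (k : String × String × String) : Bool := k.1 == "ss" || k.2.1 == "ss" || k.2.2 == "ss"

lemma pv_bne_of_eq {x : String} (h : (x == "ss") = true) : (x != "ss") = false := by
  simp [bne, h]

lemma pv_bne_of_ne {x : String} (h : (x == "ss") = false) : (x != "ss") = true := by
  simp [bne, h]

lemma pv_count_split (c : List String) :
    c.countP (fun x => x == "ss") + c.countP (fun x => x != "ss") = c.length := by
  induction c with
  | nil => simp
  | cons x l ih =>
    simp only [List.countP_cons, List.length_cons]
    cases h : x == "ss"
    · rw [pv_bne_of_ne h]; simp; omega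
    · rw [pv_bne_of_eq h]; simp; omega

lemma pv_count_c (c : List String) (s f : String) :
    List.countP pvQ (c.map fun p => (s, f, p)) =
      if s == "ss" || f == "ss" then c.length else c.countP (fun x => x == "ss") := by
  rw [List.countP_map]
  cases h : (s == "ss" || f == "ss")
  · rw [if_neg (by decide)]
    apply List.countP_congr
    intro p _
    simp only [Function.comp, pvQ]
    simp only [Bool.or_eq_false_iff] at h
    simp [h.1, h.2]
  · rw [if_pos (by decide)]
    have : List.countP (pvQ ∘ fun p => (s, f, p)) c = List.countP (fun _ => true) c := by
      apply List.countP_congr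
      intro p _
      simp only [Function.comp, pvQ]
      rcases Bool.or_eq_true_iff.mp h with h' | h' <;> simp [h']
    rw [this]
    simp

lemma pv_count_bc (b c : List String) (s : String) :
    (List.countP pvQ (b.flatMap fun f => c.map fun p => (s, f, p)) : Int) =
      (b.length : Int) * (c.length : Int) -
        (if s == "ss" then 0 else
          (b.countP (fun x => x != "ss") : Int) * (c.countP (fun x => x != "ss") : Int)) := by
  induction b with
  | nil => cases h : (s == "ss") <;> simp
  | cons f b' ih =>
    simp only [List.flatMap_cons, List.countP_append, List.countP_cons, List.length_cons]
    rw [pv_count_c]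
    have hc : ((c.countP (fun x => x == "ss") : Int)) + (c.countP (fun x => x != "ss") : Int)
        = (c.length : Int) := by exact_mod_cast pv_count_split c
    cases hs : (s == "ss")
    · rw [if_neg (by simp [hs])] at ih
      cases hf : (f == "ss")
      · rw [if_neg (by decide), if_pos (pv_bne_of_ne hf), if_neg (by decide)]
        push_cast [ih]
        linear_combination hc
      · rw [if_pos (by decide),
          if_neg (show ¬(f != "ss") = true by simp [pv_bne_of_eq hf]), if_neg (by decide)]
        push_cast [ih]
        ring
    · rw [if_pos hs] at ih
      rw [if_pos (show (true || f == "ss") = true by simp), if_pos (show (true : Bool) = true from rfl)]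
      push_cast [ih]
      ring

lemma pv_count_abc (a b c : List String) :
    (List.countP pvQ (a.flatMap fun s => b.flatMap fun f => c.map fun p => (s, f, p)) : Int) =
      (a.length : Int) * (b.length : Int) * (c.length : Int) -
        (a.countP (fun x => x != "ss") : Int) * (b.countP (fun x => x != "ss") : Int) *
          (c.countP (fun x => x != "ss") : Int) := by
  induction a with
  | nil => simp
  | cons s a' ih =>
    simp only [List.flatMap_cons, List.countP_append, List.countP_cons, List.length_cons]
    have hbc := pv_count_bc b c s
    have hb : ((b.countP (fun x => x == "ss") : Int)) + (b.countP (fun x => x != "ss") : Int)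
        = (b.length : Int) := by exact_mod_cast pv_count_split b
    cases hs : (s == "ss")
    · rw [if_neg (by simp [hs])] at hbc
      rw [if_pos (pv_bne_of_ne hs)]
      push_cast [hbc, ih]
      ring
    · rw [if_pos hs] at hbc
      rw [if_neg (by simp [pv_bne_of_eq hs])]
      push_cast [hbc, ih]
      ring

-- ===== VERDICT (by name: the statement is the Claim_ definition above) =====
theorem santDisVL_spec : Claim_equal_santDisVL := by
  intro a b c _
  show santDisVL a b c = santDisVL_alt a b c
  unfold santDisVL santDisVL_alt
  simp only [PySem.List.foldl_append_singleton_eq_map, PySem.List.foldl_append_eq_flatMap,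
    List.nil_append]
  rw [show (fun (res : Int) (k : String × String × String) =>
        if k.1 == "ss" || k.2.1 == "ss" || k.2.2 == "ss" then res + 1 else res) =
      (fun res k => if pvQ k then res + 1 else res) from rfl]
  rw [PySem.List.foldl_count_if]
  simpa using pv_count_abc a b c
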